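-- pv_equiv track=rewrite | github.com/s2503901ernie/LeetCode | Contest/240413/4.py | dfs
-- ===== SOURCE A (Python) =====
-- def dfs(start, nums, max_val):
--     cur = 0
--     stop = len(nums) - 1
--     for i in range(start, len(nums)):
--         if nums[i] == max_val:
--             cur += 1
--         if nums[i] > max_val:
--             stop = i
--             break
--     return cur, stop
-- ===== SOURCE B (Python) =====
-- def dfs(start, nums, max_val):
--     n = len(nums)
--     # Phase 1: find the boundary: first index i in range(start, n) with nums[i] > max_val.
--     stop = n - 1
--     end = n
--     for i in range(start, n):
--         if nums[i] > max_val: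
--             stop = i
--             end = i
--             break
--     # Phase 2: count occurrences of max_val before the boundary.
--     cur = sum(1 for i in range(start, end) if nums[i] == max_val)
--     return cur, stop
-- ===== Notes on version B (the rewrite author's own statement) =====
-- stated objective: alternative
-- what changed: A's single fused loop that counts and detects the stop in one pass is split into two separate passes: a boundary search for the first element greater than max_val, then an independent count of max_val over the region before that boundary.
import Mathlib
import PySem

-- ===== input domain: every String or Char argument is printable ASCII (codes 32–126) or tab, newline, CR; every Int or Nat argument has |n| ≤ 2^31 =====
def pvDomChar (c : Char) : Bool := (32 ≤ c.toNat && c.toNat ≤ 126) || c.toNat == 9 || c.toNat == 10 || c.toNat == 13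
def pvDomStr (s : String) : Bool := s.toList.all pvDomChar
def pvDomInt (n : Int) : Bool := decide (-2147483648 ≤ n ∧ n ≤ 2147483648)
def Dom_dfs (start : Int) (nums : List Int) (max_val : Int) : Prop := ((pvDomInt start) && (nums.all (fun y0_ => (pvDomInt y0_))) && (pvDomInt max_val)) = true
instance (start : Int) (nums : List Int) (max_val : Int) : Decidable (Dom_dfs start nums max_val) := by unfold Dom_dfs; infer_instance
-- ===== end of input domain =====

-- B replaces A's fused count-and-detect loop by a boundary search followed by a separate count
-- over the region before the boundary (objective: alternative decomposition, same cost).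

-- ===== PORT A =====
-- A's for-loop with early break, step for step; 'none' from pyGet? is Python's IndexError,
-- excluded by Pre_dfs (the loop state is returned there only to stay total).
def dfsLoopA (nums : List Int) (max_val : Int) (idxs : List Int) (cur stop : Int) : Int × Int :=
  match idxs with
  | [] => (cur, stop)
  | i :: rest =>
    match PySem.List.pyGet? nums i with
    | none => (cur, stop)
    | some v =>
      let cur' := if v = max_val then cur + 1 else cur
      if v > max_val then (cur', i)
      else dfsLoopA nums max_val rest cur' stop

def dfs (start : Int) (nums : List Int) (max_val : Int) : Int × Int :=
  dfsLoopA nums max_val (PySem.List.pyRange start (nums.length : Int) 1) 0 ((nums.length : Int) - 1)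

-- ===== PORT B =====
-- Phase 1 of Source B: first index i in range(start, n) with nums[i] > max_val.
def dfsBoundary (nums : List Int) (max_val : Int) (idxs : List Int) : Option Int :=
  match idxs with
  | [] => none
  | i :: rest =>
    match PySem.List.pyGet? nums i with
    | none => none
    | some v => if v > max_val then some i else dfsBoundary nums max_val rest

-- Phase 2 of Source B: sum(1 for i in range(start, end) if nums[i] == max_val).
def dfsCount (nums : List Int) (max_val : Int) (idxs : List Int) : Int :=
  idxs.foldl (fun c i => if PySem.List.pyGet? nums i = some max_val then c + 1 else c) 0

def dfs_alt (start : Int) (nums : List Int) (max_val : Int) : Int × Int :=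
  let n : Int := (nums.length : Int)
  match dfsBoundary nums max_val (PySem.List.pyRange start n 1) with
  | some i => (dfsCount nums max_val (PySem.List.pyRange start i 1), i)
  | none => (dfsCount nums max_val (PySem.List.pyRange start n 1), n - 1)

-- ===== PRECONDITION & SPEC =====
-- A raises IndexError when start < -len(nums) (the first nums[i] access is out of range);
-- exactly those inputs are excluded. B raises there too.
def Pre_dfs (start : Int) (nums : List Int) (max_val : Int) : Prop :=
  -(nums.length : Int) ≤ start

instance (start : Int) (nums : List Int) (max_val : Int) : Decidable (Pre_dfs start nums max_val) := by
  unfold Pre_dfs; infer_instance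

def pvWitness_dfs : Int × List Int × Int := (0, [1, 2, 3], 2)

def Spec_dfs (start : Int) (nums : List Int) (max_val : Int) (out : Int × Int) : Prop := out = dfs_alt start nums max_val
instance (start : Int) (nums : List Int) (max_val : Int) (out : Int × Int) : Decidable (Spec_dfs start nums max_val out) := by unfold Spec_dfs; infer_instance

-- ===== CLAIM (what is proved, stated in full; the proofs are below) =====
def Claim_equal_dfs : Prop := ∀ (start : Int) (nums : List Int) (max_val : Int), Dom_dfs start nums max_val → Pre_dfs start nums max_val → Spec_dfs start nums max_val (dfs start nums max_val)

-- ===== LEMMAS AND PROOFS =====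

-- shift the foldl accumulator of dfsCount out
theorem dfsCount_cons (nums : List Int) (max_val i : Int) (idxs : List Int) :
    dfsCount nums max_val (i :: idxs)
      = (if PySem.List.pyGet? nums i = some max_val then 1 else 0) + dfsCount nums max_val idxs := by
  have key : ∀ (l : List Int) (c : Int),
      l.foldl (fun c i => if PySem.List.pyGet? nums i = some max_val then c + 1 else c) c
        = c + l.foldl (fun c i => if PySem.List.pyGet? nums i = some max_val then c + 1 else c) 0 := by
    intro l
    induction l with
    | nil => intro c; simp
    | cons x xs ih =>
      intro c
      simp only [List.foldl_cons]
      rw [ih, ih (if PySem.List.pyGet? nums x = some max_val then 0 + 1 else 0)]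
      split <;> ring
  simp only [dfsCount, List.foldl_cons]
  rw [key]
  split <;> ring

-- any boundary found in pyRange a b 1 is ≥ a
theorem dfsBoundary_lb (nums : List Int) (max_val : Int) (a b i : Int)
    (h : dfsBoundary nums max_val (PySem.List.pyRange a b 1) = some i) : a ≤ i := by
  have hm : i ∈ PySem.List.pyRange a b 1 := by
    generalize hl : PySem.List.pyRange a b 1 = l at h
    clear hl
    induction l with
    | nil => simp [dfsBoundary] at h
    | cons x xs ih =>
      simp only [dfsBoundary] at h
      cases hx : PySem.List.pyGet? nums x with
      | none => simp [hx] at h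
      | some v =>
        simp only [hx] at h
        split at h
        · simp at h; simp [h]
        · exact List.mem_cons_of_mem _ (ih h)
  exact (PySem.List.mem_pyRange_one.mp hm).1

-- main invariant: A's fused loop equals boundary-then-count, with accumulator cur
theorem main_lemma (nums : List Int) (max_val : Int) (a cur stop : Int)
    (ha : -(nums.length : Int) ≤ a) :
    dfsLoopA nums max_val (PySem.List.pyRange a (nums.length : Int) 1) cur stop
      = match dfsBoundary nums max_val (PySem.List.pyRange a (nums.length : Int) 1) with
        | some i => (cur + dfsCount nums max_val (PySem.List.pyRange a i 1), i)
        | none => (cur + dfsCount nums max_val (PySem.List.pyRange a (nums.length : Int) 1), stop) := by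
  by_cases hab : a < (nums.length : Int)
  case neg =>
    rw [PySem.List.pyRange_one_eq_nil (by omega)]
    simp [dfsLoopA, dfsBoundary, dfsCount]
  case pos =>
    have hfuel : ((nums.length : Int) - a).toNat = (((nums.length : Int) - (a + 1)).toNat) + 1 := by omega
    rw [PySem.List.pyRange_one_cons hab]
    obtain ⟨v, hv⟩ : ∃ v, PySem.List.pyGet? nums a = some v := by
      cases hg : PySem.List.pyGet? nums a with
      | none =>
        exfalso
        rw [PySem.List.pyGet?_eq_none_iff] at hg
        exact hg ⟨by omega, by omega⟩
      | some v => exact ⟨v, rfl⟩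
    simp only [dfsLoopA, dfsBoundary, hv]
    by_cases hgt : v > max_val
    · simp only [if_pos hgt]
      have hne : ¬ v = max_val := by omega
      rw [PySem.List.pyRange_one_eq_nil (le_refl a)]
      simp [hne, dfsCount]
    · simp only [if_neg hgt]
      rw [main_lemma nums max_val (a + 1) _ stop (by omega)]
      cases hb : dfsBoundary nums max_val (PySem.List.pyRange (a + 1) (nums.length : Int) 1) with
      | some i =>
        have hai : a + 1 ≤ i := dfsBoundary_lb nums max_val (a + 1) _ i hb
        have hsplit : PySem.List.pyRange a i 1 = a :: PySem.List.pyRange (a + 1) i 1 :=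
          PySem.List.pyRange_one_cons (by omega)
        simp only [hsplit, dfsCount_cons, hv]
        rcases eq_or_ne v max_val with h | h <;> simp [h] <;> ring
      | none =>
        have hsplit : PySem.List.pyRange a (nums.length : Int) 1
            = a :: PySem.List.pyRange (a + 1) (nums.length : Int) 1 :=
          PySem.List.pyRange_one_cons hab
        simp only [hsplit, dfsCount_cons, hv]
        rcases eq_or_ne v max_val with h | h <;> simp [h] <;> ring
termination_by ((nums.length : Int) - a).toNat
decreasing_by omega

-- ===== VERDICT (by name: the statement is the Claim_ definition above) =====
theorem dfs_spec : Claim_equal_dfs := by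
  intro start nums max_val _ hpre
  unfold Spec_dfs dfs dfs_alt
  rw [main_lemma nums max_val start 0 ((nums.length : Int) - 1) hpre]
  cases hb : dfsBoundary nums max_val (PySem.List.pyRange start (nums.length : Int) 1) <;>
    simp only [hb, zero_add]
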